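-- pv_equiv track=rewrite | github.com/LucianoSaldivia/HilosLibertad | Registrador/EstadosEventosSesiones.py | getReportList
-- ===== SOURCE A (Python) =====
-- import enum
--
-- class State(enum.IntEnum):
--     STOPPED = 0
--     WORKING = 1
--
-- class Event(enum.IntEnum):
--     NO_SESSION          = 0     # no hay sesión
--     SESSION_STARTED     = 1     # Sesión Activa -> inicia
--     SESSION_CONTINUES   = 2     # Sesión Activa -> continua
--     SESSION_FINISHED    = 3     # Sesión Activa -> termina
--
-- def getReportList(prev_st: list, curr_st: list, lastReport: list = None) -> list:
--     """Compara los cambios de estados, para detectar eventos de la sesión de cada máquina.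
--     Para cada máquina, evalúa:
--         STOPPED a STOPPED   -> NO_SESSION
--         STOPPED a WORKING   -> SESSION_STARTED
--         WORKING a WORKING   -> SESSION_CONTINUES
--         WORKING a STOPPED   -> SESSION_FINISHED
--     Luego, compara con las sesiones anteriores, y guarda una lista por máquina, que contiene:
--         [ ID_MAQ, Start_DT, Last_DT, Last_Event ]
--     donde DT es DateTime.
--     Retorna una lista de estas listas.
--
--     Para la posición 0, se espera un DateTime del momento en que curr_st fue cargado.
--     """
--     # Si las listas tienen distinto tamaño, no se pueden comparar
--     if len(prev_st) != len(curr_st):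
--         raise Exception(f"""Debe cumplirse: len(prev_st) == len(curr_st)
--         len(prev_st) = {len(prev_st)}
--         len(curr_st) = {len(curr_st)}""")
--     else:
--
--         # Nuevo reporte (luego de escritura a base de datos)
--         if lastReport is None:
--             new_report = list()
--             for i in range(len(curr_st)):
--                 # Si sigue parada, me voy, sino entro
--                 if not( prev_st[i] == State.STOPPED and curr_st[i] == State.STOPPED ):
--
--                     # Machine state from STOPPED to WORKING -> SESSION_STARTED
--                     if   prev_st[i] == State.STOPPED and curr_st[i] == State.WORKING:
--                         new_report.append( [i, curr_st[0], curr_st[0], Event.SESSION_STARTED] )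
--
--                     # Machine state from WORKING to WORKING -> SESSION_CONTINUES
--                     elif prev_st[i] == State.WORKING and curr_st[i] == State.WORKING:
--                         new_report.append( [i, curr_st[0], curr_st[0], Event.SESSION_CONTINUES] )
--
--                     # Machine state from WORKING to STOPPED -> SESSION_FINISHED
--                     elif prev_st[i] == State.WORKING and curr_st[i] == State.STOPPED:
--                         new_report.append( [i, curr_st[0], curr_st[0], Event.SESSION_FINISHED] )
--             return new_report
--
--         # Ya hubo un reporte, tengo que actualizarlo
--         else:
--             for i in range(len(curr_st)):
--                 # Si sigue parada, me voy, sino entro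
--                 if not( prev_st[i] == State.STOPPED and curr_st[i] == State.STOPPED ):
--
--                     # Machine state from STOPPED to WORKING -> SESSION_STARTED
--                     if   prev_st[i] == State.STOPPED and curr_st[i] == State.WORKING:
--                         # Como sólo empieza, no tengo que chequear nada y agrego a la lista
--                         lastReport.append( [i, curr_st[0], curr_st[0], Event.SESSION_STARTED] )
--
--                     # Machine state from WORKING to WORKING -> SESSION_CONTINUES
--                     elif prev_st[i] == State.WORKING and curr_st[i] == State.WORKING:
--                         for j in range(len(lastReport)):
--                             # Encuentro el último reporte "Started" o "Continues" de ésta máquina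
--                             if lastReport[j][0] == i and lastReport[j][3] != Event.SESSION_FINISHED:
--                                 # Actualizo el Last_DT
--                                 lastReport[j][2] = curr_st[0]
--                                 # Actualizo el Last_Event a SESSION_CONTINUES
--                                 lastReport[j][3] = Event.SESSION_CONTINUES
--                                 break
--
--                     # Machine state from WORKING to STOPPED -> SESSION_FINISHED
--                     elif prev_st[i] == State.WORKING and curr_st[i] == State.STOPPED:
--                         for j in range(len(lastReport)):
--                             # Encuentro el último reporte "Started" o "Continues" de ésta máquina
--                             if lastReport[j][0] == i and lastReport[j][3] != Event.SESSION_FINISHED: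
--                                 # Actualizo el Last_DT
--                                 lastReport[j][2] = curr_st[0]
--                                 # Actualizo el Last_Event a SESSION_FINISHED
--                                 lastReport[j][3] = Event.SESSION_FINISHED
--                                 break
--             return lastReport
-- ===== SOURCE B (Python) =====
-- # Different algorithm: one pass computes the (machine, event) pairs from the two
-- # state vectors, then the report is indexed once (machine id -> first non-finished
-- # row), so every update is an O(1) lookup instead of an inner scan over the report.
-- # Like A, this mutates `lastReport` in place (row updates and appends) when given.
--
-- _EVENT = {(0, 1): 1, (1, 1): 2, (1, 0): 3}  # (prev, curr) -> session event
--
--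
-- def getReportList(prev_st: list, curr_st: list, lastReport: list = None) -> list:
--     if len(prev_st) != len(curr_st):
--         raise Exception(f"""Debe cumplirse: len(prev_st) == len(curr_st)
--         len(prev_st) = {len(prev_st)}
--         len(curr_st) = {len(curr_st)}""")
--     dt = curr_st[0] if curr_st else None
--     events = [(i, _EVENT[pc]) for i, pc in enumerate(zip(prev_st, curr_st)) if pc in _EVENT]
--     if lastReport is None:
--         return [[i, dt, dt, ev] for i, ev in events]
--     updates = [(i, ev) for i, ev in events if ev != 1]
--     if updates:
--         open_idx = {}
--         for j, row in enumerate(lastReport):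
--             if row[3] != 3 and row[0] not in open_idx:
--                 open_idx[row[0]] = j
--         for i, ev in updates:
--             j = open_idx.get(i)
--             if j is not None:
--                 lastReport[j][2] = dt
--                 lastReport[j][3] = ev
--     lastReport.extend([i, dt, dt, 1] for i, ev in events if ev == 1)
--     return lastReport
-- ===== Notes on version B (the rewrite author's own statement) =====
-- stated objective: faster
-- what changed: B first derives the (machine, event) pairs in one pass over the zipped state lists, then builds a dict indexing lastReport by machine id (first non-finished row) once, so each session update is an O(1) lookup instead of A's inner scan over the whole report.
-- outside the precondition, e.g. on getReportList([1], [1], [[0, 5, 5, 1], [9]]): A returns [[0, 5, 1, 2], [9]], B raises IndexError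
import Mathlib
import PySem

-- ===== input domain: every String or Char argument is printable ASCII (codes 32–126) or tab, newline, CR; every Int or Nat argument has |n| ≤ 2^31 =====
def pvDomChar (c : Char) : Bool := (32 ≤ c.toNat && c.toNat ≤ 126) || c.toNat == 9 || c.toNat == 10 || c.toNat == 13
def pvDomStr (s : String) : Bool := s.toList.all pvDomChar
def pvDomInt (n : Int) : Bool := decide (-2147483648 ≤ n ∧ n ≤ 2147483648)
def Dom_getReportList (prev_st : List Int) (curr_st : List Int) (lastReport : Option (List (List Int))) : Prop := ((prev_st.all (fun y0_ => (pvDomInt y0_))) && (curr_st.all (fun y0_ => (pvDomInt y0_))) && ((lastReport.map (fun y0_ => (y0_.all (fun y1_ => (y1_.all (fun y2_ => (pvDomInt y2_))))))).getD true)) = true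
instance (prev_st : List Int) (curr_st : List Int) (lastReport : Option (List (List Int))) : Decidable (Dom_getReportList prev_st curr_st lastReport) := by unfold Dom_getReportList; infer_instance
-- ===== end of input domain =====

-- One honest line: B replaces A's inner scan of lastReport with a dict index (machine id ->
-- first non-finished row) built in one pass; equivalence is about the RETURN value (both
-- Pythons mutate `lastReport` in place in the same way).

-- ===== PORT A =====
-- inner `for j in range(len(lastReport)): ... break` scan: first row with row[0]==i and
-- row[3]!=3 gets row[2]=dt, row[3]=ev (ported as structural recursion over the rows)
def pvScanUpd (rep : List (List Int)) (i dt ev : Int) : List (List Int) :=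
  match rep with
  | [] => []
  | r :: rest =>
    if PySem.List.pyGetD r 0 0 = i ∧ PySem.List.pyGetD r 3 0 ≠ 3 then
      PySem.List.pySetD (PySem.List.pySetD r 2 dt) 3 ev :: rest
    else r :: pvScanUpd rest i dt ev

def getReportList (prev_st : List Int) (curr_st : List Int) (lastReport : Option (List (List Int))) : List (List Int) :=
  if prev_st.length ≠ curr_st.length then []  -- Python raises Exception here; outside Pre_
  else
    match lastReport with
    | none =>
      (PySem.List.pyRange 0 (curr_st.length : Int) 1).foldl (fun new_report i =>
        let p := PySem.List.pyGetD prev_st i 0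
        let c := PySem.List.pyGetD curr_st i 0
        let dt := PySem.List.pyGetD curr_st 0 0
        if ¬ (p = 0 ∧ c = 0) then
          if p = 0 ∧ c = 1 then new_report ++ [[i, dt, dt, 1]]
          else if p = 1 ∧ c = 1 then new_report ++ [[i, dt, dt, 2]]
          else if p = 1 ∧ c = 0 then new_report ++ [[i, dt, dt, 3]]
          else new_report
        else new_report) []
    | some rep =>
      (PySem.List.pyRange 0 (curr_st.length : Int) 1).foldl (fun acc i =>
        let p := PySem.List.pyGetD prev_st i 0
        let c := PySem.List.pyGetD curr_st i 0
        let dt := PySem.List.pyGetD curr_st 0 0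
        if ¬ (p = 0 ∧ c = 0) then
          if p = 0 ∧ c = 1 then acc ++ [[i, dt, dt, 1]]
          else if p = 1 ∧ c = 1 then pvScanUpd acc i dt 2
          else if p = 1 ∧ c = 0 then pvScanUpd acc i dt 3
          else acc
        else acc) rep

-- ===== PORT B =====
-- _EVENT = {(0, 1): 1, (1, 1): 2, (1, 0): 3}
def pvEV : PySem.Dict (Int × Int) Int :=
  PySem.Dict.ofList [((0, 1), 1), ((1, 1), 2), ((1, 0), 3)]

-- [(i, _EVENT[pc]) for i, pc in enumerate(zip(prev_st, curr_st)) if pc in _EVENT]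
def pvEvents (prev_st curr_st : List Int) : List (Int × Int) :=
  (PySem.List.enumerate (prev_st.zip curr_st) 0).filterMap
    (fun q => (pvEV.get? q.2).map (fun e => (q.1, e)))

-- open_idx: machine id -> index of its first non-finished row
def pvOpenIdx (rep : List (List Int)) : PySem.Dict Int Int :=
  (PySem.List.enumerate rep 0).foldl
    (fun d q =>
      if PySem.List.pyGetD q.2 3 0 ≠ 3 ∧ (d.get? (PySem.List.pyGetD q.2 0 0)).isNone then
        d.insert (PySem.List.pyGetD q.2 0 0) q.1
      else d)
    PySem.Dict.empty

-- the `for i, ev in updates:` loop (openIdx is fixed; rows are updated in place)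
def pvApplyUpds (openIdx : PySem.Dict Int Int) (dt : Int) (rep : List (List Int))
    (updates : List (Int × Int)) : List (List Int) :=
  updates.foldl (fun r q =>
    match openIdx.get? q.1 with
    | some j =>
      let row := PySem.List.pyGetD r j []
      let row := PySem.List.pySetD row 2 dt
      let row := PySem.List.pySetD row 3 q.2
      PySem.List.pySetD r j row
    | none => r) rep

def getReportList_alt (prev_st : List Int) (curr_st : List Int) (lastReport : Option (List (List Int))) : List (List Int) :=
  if prev_st.length ≠ curr_st.length then []  -- raises, as in A; outside Pre_
  else
    let dt := PySem.List.pyGetD curr_st 0 0  -- Source B: curr_st[0] if curr_st else None (never read when curr_st = [])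
    let events := pvEvents prev_st curr_st
    match lastReport with
    | none => events.map (fun q => [q.1, dt, dt, q.2])
    | some rep =>
      let updates := events.filter (fun q => decide (q.2 ≠ 1))
      let rep' := if updates ≠ [] then pvApplyUpds (pvOpenIdx rep) dt rep updates else rep
      rep' ++ (events.filter (fun q => decide (q.2 = 1))).map (fun q => [q.1, dt, dt, 1])

-- ===== PRECONDITION & SPEC =====
-- Pre_ excludes (a) length-mismatched state lists (A raises Exception) and (b) reports
-- containing a row shorter than the documented 4 fields [id, start, last, event] when some
-- machine was WORKING (A's row scan may raise IndexError there, and still returns only when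
-- a complete matching row happens to precede every short one).
def Pre_getReportList (prev_st : List Int) (curr_st : List Int) (lastReport : Option (List (List Int))) : Prop :=
  prev_st.length = curr_st.length ∧
  ((∃ i ∈ List.range curr_st.length, prev_st.getD i 0 = 1 ∧ (curr_st.getD i 0 = 0 ∨ curr_st.getD i 0 = 1)) →
    ∀ row ∈ lastReport.getD [], 4 ≤ row.length)
instance (prev_st : List Int) (curr_st : List Int) (lastReport : Option (List (List Int))) : Decidable (Pre_getReportList prev_st curr_st lastReport) := by unfold Pre_getReportList; infer_instance

def pvWitness_getReportList : List Int × List Int × Option (List (List Int)) :=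
  ([0, 1], [5, 0], some [[1, 3, 3, 1]])

def Spec_getReportList (prev_st : List Int) (curr_st : List Int) (lastReport : Option (List (List Int))) (out : List (List Int)) : Prop := out = getReportList_alt prev_st curr_st lastReport
instance (prev_st : List Int) (curr_st : List Int) (lastReport : Option (List (List Int))) (out : List (List Int)) : Decidable (Spec_getReportList prev_st curr_st lastReport out) := by unfold Spec_getReportList; infer_instance

-- ===== CLAIM (what is proved, stated in full; the proofs are below) =====
def Claim_equal_getReportList : Prop := ∀ (prev_st : List Int) (curr_st : List Int) (lastReport : Option (List (List Int))), Dom_getReportList prev_st curr_st lastReport → Pre_getReportList prev_st curr_st lastReport → Spec_getReportList prev_st curr_st lastReport (getReportList prev_st curr_st lastReport)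

-- ===== LEMMAS AND PROOFS =====

def pvEvOf (p c : Int) : Option Int :=
  if p = 0 ∧ c = 1 then some 1 else if p = 1 ∧ c = 1 then some 2
  else if p = 1 ∧ c = 0 then some 3 else none

def pvEvAt (prev_st curr_st : List Int) (i : Int) : Option Int :=
  pvEvOf (PySem.List.pyGetD prev_st i 0) (PySem.List.pyGetD curr_st i 0)

def pvPred (i : Int) (r : List Int) : Bool :=
  decide (PySem.List.pyGetD r 0 0 = i ∧ PySem.List.pyGetD r 3 0 ≠ 3)

lemma pvEV_get (p c : Int) : pvEV.get? (p, c) = pvEvOf p c := by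
  have h : pvEV = PySem.Dict.mk [((0, 1), 1), ((1, 1), 2), ((1, 0), 3)] := by decide
  rw [h]
  unfold pvEvOf
  simp only [PySem.Dict.get?_mk_cons]
  by_cases h1 : p = 0 <;> by_cases h2 : p = 1 <;> by_cases h3 : c = 0 <;> by_cases h4 : c = 1 <;>
    simp_all [Prod.ext_iff, PySem.Dict.get?] <;>
    first | omega | (split_ifs <;> simp_all <;> omega)

lemma pvScanUpd_eq_findIdx (U : List (List Int)) (i dt ev : Int) :
    pvScanUpd U i dt ev =
      match U.findIdx? (pvPred i) with
      | some j => U.set j (PySem.List.pySetD (PySem.List.pySetD (U.getD j []) 2 dt) 3 ev)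
      | none => U := by
  induction U with
  | nil => simp [pvScanUpd]
  | cons r rest ih =>
    by_cases h : PySem.List.pyGetD r 0 0 = i ∧ PySem.List.pyGetD r 3 0 ≠ 3
    · simp [pvScanUpd, h, List.findIdx?_cons, pvPred]
    · simp only [pvScanUpd, if_neg h, List.findIdx?_cons, pvPred, decide_eq_true_eq, h,
        decide_false]
      rw [ih]
      cases hf : rest.findIdx? (pvPred i) <;> simp [pvPred, hf]

lemma pvOpenIdx_aux (i : Int) :
    ∀ (rep : List (List Int)) (s : Int) (d : PySem.Dict Int Int),
      ((PySem.List.enumerate rep s).foldl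
        (fun d q =>
          if PySem.List.pyGetD q.2 3 0 ≠ 3 ∧ (d.get? (PySem.List.pyGetD q.2 0 0)).isNone then
            d.insert (PySem.List.pyGetD q.2 0 0) q.1
          else d) d).get? i =
      match d.get? i with
      | some v => some v
      | none => (rep.findIdx? (pvPred i)).map (fun jn => s + (jn : Int)) := by
  intro rep
  induction rep with
  | nil => intro s d; cases h : d.get? i <;> simp [PySem.List.enumerate_nil, h]
  | cons r rest ih =>
    intro s d
    rw [PySem.List.enumerate_cons, List.foldl_cons, ih]
    by_cases hp : PySem.List.pyGetD r 0 0 = i ∧ PySem.List.pyGetD r 3 0 ≠ 3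
    · -- pvPred i r true
      cases hd : d.get? i with
      | some v =>
        have : ¬ (d.get? (PySem.List.pyGetD r 0 0)).isNone := by rw [hp.1, hd]; simp
        rw [if_neg (by tauto), hd]
      | none =>
        rw [if_pos ⟨hp.2, by rw [hp.1, hd]; rfl⟩, hp.1, PySem.Dict.get?_insert_self]
        simp [List.findIdx?_cons, pvPred, hp]
    · -- pvPred i r false
      have hfind : (r :: rest).findIdx? (pvPred i) = (rest.findIdx? (pvPred i)).map (· + 1) := by
        simp [List.findIdx?_cons, pvPred, hp]
      rw [hfind]
      by_cases hc : PySem.List.pyGetD r 3 0 ≠ 3 ∧ (d.get? (PySem.List.pyGetD r 0 0)).isNone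
      · rw [if_pos hc]
        have hne : i ≠ PySem.List.pyGetD r 0 0 := by
          intro he; exact hp ⟨he.symm, hc.1⟩
        rw [PySem.Dict.get?_insert, if_neg hne]
        cases hd : d.get? i <;> cases hf : rest.findIdx? (pvPred i) <;>
          simp [hd, hf, Option.map_map] <;> ring_nf
      · rw [if_neg hc]
        cases hd : d.get? i <;> cases hf : rest.findIdx? (pvPred i) <;>
          simp [hd, hf, Option.map_map] <;> ring_nf

lemma pvOpenIdx_get (rep : List (List Int)) (i : Int) :
    (pvOpenIdx rep).get? i = (rep.findIdx? (pvPred i)).map (fun jn => (jn : Int)) := by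
  unfold pvOpenIdx
  rw [pvOpenIdx_aux]
  simp [PySem.Dict.get?_empty]

lemma findIdx?_congr_pointwise {α : Type} (p : α → Bool) :
    ∀ (l1 l2 : List α), l1.length = l2.length →
      (∀ jn (h1 : jn < l1.length) (h2 : jn < l2.length), p l1[jn] = p l2[jn]) →
      l1.findIdx? p = l2.findIdx? p := by
  intro l1
  induction l1 with
  | nil => intro l2 hl _; cases l2 <;> simp_all
  | cons x xs ih =>
    intro l2 hl hp
    cases l2 with
    | nil => simp at hl
    | cons y ys =>
      have h0 := hp 0 (by simp) (by simp)
      simp only [List.getElem_cons_zero] at h0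
      rw [List.findIdx?_cons, List.findIdx?_cons, h0,
        ih ys (by simpa using hl) (fun jn h1 h2 => by
          have := hp (jn + 1) (by simpa using h1) (by simpa using h2)
          simpa using this)]

-- one step of B's update loop
lemma pvApplyUpds_cons (openIdx : PySem.Dict Int Int) (dt : Int) (rep : List (List Int))
    (q : Int × Int) (ups : List (Int × Int)) :
    pvApplyUpds openIdx dt rep (q :: ups) =
      pvApplyUpds openIdx dt
        (match openIdx.get? q.1 with
         | some j => PySem.List.pySetD rep j
             (PySem.List.pySetD (PySem.List.pySetD (PySem.List.pyGetD rep j []) 2 dt) 3 q.2)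
         | none => rep) ups := by
  unfold pvApplyUpds
  rw [List.foldl_cons]

lemma pvRow_set_keeps (row : List Int) (dt ev : Int) :
    PySem.List.pyGetD (PySem.List.pySetD (PySem.List.pySetD row 2 dt) 3 ev) 0 0 =
      PySem.List.pyGetD row 0 0 := by
  rw [PySem.List.pySetD_of_nonneg _ _ (by norm_num), PySem.List.pySetD_of_nonneg _ _ (by norm_num)]
  simp only [PySem.List.pyGetD_zero]
  unfold List.getD
  rw [List.getElem?_set_ne (by norm_num), List.getElem?_set_ne (by norm_num)]

lemma pvApplyUpds_inv (rep : List (List Int)) (dt i : Int) :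
    ∀ (ups : List (Int × Int)) (U : List (List Int)),
      (∀ q ∈ ups, q.1 ≠ i) → U.length = rep.length →
      (∀ jn : Nat,
         PySem.List.pyGetD (U.getD jn []) 0 0 = PySem.List.pyGetD (rep.getD jn []) 0 0 ∧
         (PySem.List.pyGetD (rep.getD jn []) 0 0 = i → U.getD jn [] = rep.getD jn [])) →
      (pvApplyUpds (pvOpenIdx rep) dt U ups).length = rep.length ∧
      (∀ jn : Nat,
         PySem.List.pyGetD ((pvApplyUpds (pvOpenIdx rep) dt U ups).getD jn []) 0 0 =
           PySem.List.pyGetD (rep.getD jn []) 0 0 ∧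
         (PySem.List.pyGetD (rep.getD jn []) 0 0 = i →
           (pvApplyUpds (pvOpenIdx rep) dt U ups).getD jn [] = rep.getD jn [])) := by
  intro ups
  induction ups with
  | nil =>
    intro U hq hlen hinv
    exact ⟨hlen, hinv⟩
  | cons q ups ih =>
    intro U hq hlen hinv
    cases hg : (pvOpenIdx rep).get? q.1 with
    | none =>
      rw [pvApplyUpds_cons]
      simp only [hg]
      exact ih U (fun q hmem => hq q (by simp [hmem])) hlen hinv
    | some j =>
      have hg2 := hg
      rw [pvOpenIdx_get] at hg2
      obtain ⟨jn, hfind, rfl⟩ : ∃ jn, rep.findIdx? (pvPred q.1) = some jn ∧ (jn : Int) = j := by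
        cases hf : rep.findIdx? (pvPred q.1) <;> simp [hf] at hg2 <;> exact ⟨_, rfl, hg2⟩
      rw [pvApplyUpds_cons]
      simp only [hg]
      obtain ⟨hjn, hpj, -⟩ := List.findIdx?_eq_some_iff_getElem.1 hfind
      have hrep0 : PySem.List.pyGetD (rep.getD jn []) 0 0 = q.1 := by
        rw [List.getD_eq_getElem _ _ hjn]
        simpa [pvPred] using (of_decide_eq_true hpj).1
      have hjnU : jn < U.length := by omega
      set row := PySem.List.pySetD (PySem.List.pySetD (PySem.List.pyGetD U (jn : Int) []) 2 dt) 3 q.2 with hrow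
      have hU'eq : PySem.List.pySetD U (jn : Int) row = U.set jn row := by
        rw [PySem.List.pySetD_of_nonneg _ _ (by positivity)]; simp
      rw [hU'eq]
      apply ih (U.set jn row) (fun q hmem => hq q (by simp [hmem])) (by simpa using hlen)
      intro kn
      by_cases hkj : kn = jn
      · subst hkj
        have hUe : (U.set kn row).getD kn [] = row := by
          rw [List.getD_eq_getElem?_getD, List.getElem?_set_self hjnU]; rfl
        have hUk : PySem.List.pyGetD U (kn : Int) [] = U.getD kn [] := by
          rw [PySem.List.pyGetD_natCast]
        constructor
        · rw [hUe, hrow, hUk, pvRow_set_keeps]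
          exact (hinv kn).1
        · intro habs
          exact absurd (hrep0.symm.trans habs) (hq q (by simp))
      · have hUe : (U.set jn row).getD kn [] = U.getD kn [] := by
          rw [List.getD_eq_getElem?_getD, List.getElem?_set_ne (fun h => hkj h.symm),
            ← List.getD_eq_getElem?_getD]
        rw [hUe]
        exact hinv kn

lemma findIdx_applyUpds (rep : List (List Int)) (dt i : Int) (ups : List (Int × Int))
    (hq : ∀ q ∈ ups, q.1 ≠ i) :
    (pvApplyUpds (pvOpenIdx rep) dt rep ups).findIdx? (pvPred i) = rep.findIdx? (pvPred i) := by
  obtain ⟨hlen, hinv⟩ := pvApplyUpds_inv rep dt i ups rep hq rfl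
    (fun jn => ⟨rfl, fun _ => rfl⟩)
  apply findIdx?_congr_pointwise _ _ _ hlen
  intro jn h1 h2
  have hD1 : (pvApplyUpds (pvOpenIdx rep) dt rep ups).getD jn [] =
      (pvApplyUpds (pvOpenIdx rep) dt rep ups)[jn] := List.getD_eq_getElem _ _ h1
  have hD2 : rep.getD jn [] = rep[jn] := List.getD_eq_getElem _ _ h2
  obtain ⟨h0, hsame⟩ := hinv jn
  rw [hD1, hD2] at h0 hsame
  by_cases hi : PySem.List.pyGetD rep[jn] 0 0 = i
  · rw [hsame hi]
  · simp only [pvPred]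
    rw [h0]
    simp [hi]

lemma pvScanUpd_applyUpds (rep : List (List Int)) (dt i e : Int) (ups : List (Int × Int))
    (hq : ∀ q ∈ ups, q.1 ≠ i) :
    pvScanUpd (pvApplyUpds (pvOpenIdx rep) dt rep ups) i dt e =
      pvApplyUpds (pvOpenIdx rep) dt rep (ups ++ [(i, e)]) := by
  have hr : pvApplyUpds (pvOpenIdx rep) dt rep (ups ++ [(i, e)]) =
      (match (pvOpenIdx rep).get? i with
       | some j => PySem.List.pySetD (pvApplyUpds (pvOpenIdx rep) dt rep ups) j
           (PySem.List.pySetD (PySem.List.pySetD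
             (PySem.List.pyGetD (pvApplyUpds (pvOpenIdx rep) dt rep ups) j []) 2 dt) 3 e)
       | none => pvApplyUpds (pvOpenIdx rep) dt rep ups) := by
    unfold pvApplyUpds
    rw [List.foldl_append]
    rfl
  rw [hr, pvScanUpd_eq_findIdx, findIdx_applyUpds rep dt i ups hq, pvOpenIdx_get]
  cases hf : rep.findIdx? (pvPred i) with
  | none => rfl
  | some jn =>
    simp only [Option.map_some]
    have h2 : ((2:Int)).toNat = 2 := rfl
    have h3 : ((3:Int)).toNat = 3 := rfl
    simp [PySem.List.pySetD_of_nonneg _ _ (Int.natCast_nonneg jn),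
      PySem.List.pySetD_of_nonneg _ _ (by norm_num : (0:Int) ≤ 2),
      PySem.List.pySetD_of_nonneg _ _ (by norm_num : (0:Int) ≤ 3),
      PySem.List.pyGetD_natCast, h2, h3]

lemma pvScanUpd_no_match (ys : List (List Int)) (i dt ev : Int)
    (h : ∀ r ∈ ys, PySem.List.pyGetD r 0 0 ≠ i) : pvScanUpd ys i dt ev = ys := by
  induction ys with
  | nil => rfl
  | cons r rest ih =>
    rw [pvScanUpd, if_neg (fun hc => h r (by simp) hc.1)]
    rw [ih (fun r hr => h r (by simp [hr]))]

lemma pvScanUpd_append (xs ys : List (List Int)) (i dt ev : Int)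
    (h : ∀ r ∈ ys, PySem.List.pyGetD r 0 0 ≠ i) :
    pvScanUpd (xs ++ ys) i dt ev = pvScanUpd xs i dt ev ++ ys := by
  induction xs with
  | nil => simpa using pvScanUpd_no_match ys i dt ev h
  | cons r rest ih =>
    by_cases hc : PySem.List.pyGetD r 0 0 = i ∧ PySem.List.pyGetD r 3 0 ≠ 3
    · simp [pvScanUpd, hc]
    · simp only [List.cons_append, pvScanUpd, if_neg hc, ih]

-- characterization of the loop bodies of port A through pvEvAt
lemma pvStepNone_char (prev_st curr_st : List Int) (acc : List (List Int)) (i : Int) :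
    (let p := PySem.List.pyGetD prev_st i 0
     let c := PySem.List.pyGetD curr_st i 0
     let dt := PySem.List.pyGetD curr_st 0 0
     if ¬ (p = 0 ∧ c = 0) then
       if p = 0 ∧ c = 1 then acc ++ [[i, dt, dt, 1]]
       else if p = 1 ∧ c = 1 then acc ++ [[i, dt, dt, 2]]
       else if p = 1 ∧ c = 0 then acc ++ [[i, dt, dt, 3]]
       else acc
     else acc) =
    acc ++ (pvEvAt prev_st curr_st i).elim []
      (fun e => [[i, PySem.List.pyGetD curr_st 0 0, PySem.List.pyGetD curr_st 0 0, e]]) := by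
  unfold pvEvAt pvEvOf
  by_cases h1 : PySem.List.pyGetD prev_st i 0 = 0 <;>
  by_cases h2 : PySem.List.pyGetD prev_st i 0 = 1 <;>
  by_cases h3 : PySem.List.pyGetD curr_st i 0 = 0 <;>
  by_cases h4 : PySem.List.pyGetD curr_st i 0 = 1 <;>
    simp [h1, h2, h3, h4] <;> omega

lemma pvStepSome_char (prev_st curr_st : List Int) (acc : List (List Int)) (i : Int) :
    (let p := PySem.List.pyGetD prev_st i 0
     let c := PySem.List.pyGetD curr_st i 0
     let dt := PySem.List.pyGetD curr_st 0 0
     if ¬ (p = 0 ∧ c = 0) then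
       if p = 0 ∧ c = 1 then acc ++ [[i, dt, dt, 1]]
       else if p = 1 ∧ c = 1 then pvScanUpd acc i dt 2
       else if p = 1 ∧ c = 0 then pvScanUpd acc i dt 3
       else acc
     else acc) =
    (pvEvAt prev_st curr_st i).elim acc
      (fun e =>
        if e = 1 then acc ++ [[i, PySem.List.pyGetD curr_st 0 0, PySem.List.pyGetD curr_st 0 0, 1]]
        else pvScanUpd acc i (PySem.List.pyGetD curr_st 0 0) e) := by
  unfold pvEvAt pvEvOf
  by_cases h1 : PySem.List.pyGetD prev_st i 0 = 0 <;>
  by_cases h2 : PySem.List.pyGetD prev_st i 0 = 1 <;>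
  by_cases h3 : PySem.List.pyGetD curr_st i 0 = 0 <;>
  by_cases h4 : PySem.List.pyGetD curr_st i 0 = 1 <;>
    simp [h1, h2, h3, h4] <;> omega

def pvUpdsTo (prev_st curr_st : List Int) (k : Nat) : List (Int × Int) :=
  (PySem.List.pyRange 0 (k : Int) 1).filterMap
    (fun j => (pvEvAt prev_st curr_st j).bind (fun e => if e ≠ 1 then some (j, e) else none))

def pvAppsTo (prev_st curr_st : List Int) (dt : Int) (k : Nat) : List (List Int) :=
  (PySem.List.pyRange 0 (k : Int) 1).filterMap
    (fun j => (pvEvAt prev_st curr_st j).bind (fun e => if e = 1 then some [j, dt, dt, 1] else none))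

lemma mem_pvAppsTo {prev_st curr_st : List Int} {dt : Int} {k : Nat} {r : List Int}
    (h : r ∈ pvAppsTo prev_st curr_st dt k) :
    ∃ j : Int, 0 ≤ j ∧ j < (k : Int) ∧ PySem.List.pyGetD r 0 0 = j := by
  obtain ⟨j, hj, hr⟩ := List.mem_filterMap.1 h
  obtain ⟨hj0, hjk⟩ := (PySem.List.mem_pyRange_one).1 hj
  refine ⟨j, hj0, hjk, ?_⟩
  cases he : pvEvAt prev_st curr_st j with
  | none => rw [he] at hr; simp at hr
  | some e =>
    rw [he] at hr
    by_cases h1 : e = 1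
    · simp only [Option.bind_some, if_pos h1] at hr
      obtain rfl := Option.some.inj hr
      exact PySem.List.pyGetD_zero_cons _ _ _
    · simp [h1] at hr

lemma mem_pvUpdsTo {prev_st curr_st : List Int} {k : Nat} {q : Int × Int}
    (h : q ∈ pvUpdsTo prev_st curr_st k) : 0 ≤ q.1 ∧ q.1 < (k : Int) := by
  obtain ⟨j, hj, hr⟩ := List.mem_filterMap.1 h
  obtain ⟨hj0, hjk⟩ := (PySem.List.mem_pyRange_one).1 hj
  cases he : pvEvAt prev_st curr_st j with
  | none => rw [he] at hr; simp at hr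
  | some e =>
    rw [he] at hr
    by_cases h1 : e = 1
    · simp [h1] at hr
    · simp only [Option.bind_some, if_pos h1] at hr
      obtain rfl := Option.some.inj hr
      exact ⟨hj0, hjk⟩

lemma pvRange_succ (k : Nat) :
    PySem.List.pyRange 0 ((k + 1 : Nat) : Int) 1 =
      PySem.List.pyRange 0 (k : Int) 1 ++ [(k : Int)] := by
  have : ((k + 1 : Nat) : Int) = (k : Int) + 1 := by push_cast; ring
  rw [this, PySem.List.pyRange_one_succ_right (by positivity)]

lemma foldSome (prev_st curr_st : List Int) (rep : List (List Int)) (k : Nat) :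
    (PySem.List.pyRange 0 (k : Int) 1).foldl (fun acc i =>
        let p := PySem.List.pyGetD prev_st i 0
        let c := PySem.List.pyGetD curr_st i 0
        let dt := PySem.List.pyGetD curr_st 0 0
        if ¬ (p = 0 ∧ c = 0) then
          if p = 0 ∧ c = 1 then acc ++ [[i, dt, dt, 1]]
          else if p = 1 ∧ c = 1 then pvScanUpd acc i dt 2
          else if p = 1 ∧ c = 0 then pvScanUpd acc i dt 3
          else acc
        else acc) rep =
      pvApplyUpds (pvOpenIdx rep) (PySem.List.pyGetD curr_st 0 0) rep
          (pvUpdsTo prev_st curr_st k) ++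
        pvAppsTo prev_st curr_st (PySem.List.pyGetD curr_st 0 0) k := by
  set dt := PySem.List.pyGetD curr_st 0 0 with hdt
  induction k with
  | zero =>
    rw [PySem.List.pyRange_one_eq_nil (by norm_num)]
    simp [pvUpdsTo, pvAppsTo, pvApplyUpds, PySem.List.pyRange_one_eq_nil (by norm_num : (0:Int) ≤ 0)]
  | succ k ih =>
    rw [pvRange_succ, List.foldl_append]
    rw [ih]
    have hupds : pvUpdsTo prev_st curr_st (k + 1) =
        pvUpdsTo prev_st curr_st k ++
          (pvEvAt prev_st curr_st (k : Int)).toList.filterMap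
            (fun e => if e ≠ 1 then some ((k : Int), e) else none) := by
      unfold pvUpdsTo
      rw [pvRange_succ, List.filterMap_append]
      congr 1
      cases he : pvEvAt prev_st curr_st (k : Int) <;> simp [he, List.filterMap_cons]
    have happs : pvAppsTo prev_st curr_st dt (k + 1) =
        pvAppsTo prev_st curr_st dt k ++
          (pvEvAt prev_st curr_st (k : Int)).toList.filterMap
            (fun e => if e = 1 then some [(k : Int), dt, dt, 1] else none) := by
      unfold pvAppsTo
      rw [pvRange_succ, List.filterMap_append]
      congr 1
      cases he : pvEvAt prev_st curr_st (k : Int) <;> simp [he, List.filterMap_cons]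
    rw [List.foldl_cons, List.foldl_nil, pvStepSome_char, hupds, happs, ← hdt]
    have hq : ∀ q ∈ pvUpdsTo prev_st curr_st k, q.1 ≠ (k : Int) := by
      intro q hq
      have := (mem_pvUpdsTo hq).2
      omega
    have hys : ∀ r ∈ pvAppsTo prev_st curr_st dt k, PySem.List.pyGetD r 0 0 ≠ (k : Int) := by
      intro r hr
      obtain ⟨j, _, hjk, hj0⟩ := mem_pvAppsTo hr
      rw [hj0]
      omega
    cases he : pvEvAt prev_st curr_st (k : Int) with
    | none => simp
    | some e =>
      by_cases h1 : e = 1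
      · subst h1
        simp only [Option.elim_some, if_pos rfl, Option.toList_some, List.filterMap_cons,
          List.filterMap_nil]
        simp [← List.append_assoc]
      · simp only [Option.elim_some, if_neg h1, Option.toList_some, List.filterMap_cons,
          List.filterMap_nil, if_neg (by simpa using h1)]
        rw [pvScanUpd_append _ _ _ _ _ hys, pvScanUpd_applyUpds rep dt (k : Int) e _ hq]
        simp [h1]

lemma foldNone (prev_st curr_st : List Int) (k : Nat) :
    (PySem.List.pyRange 0 (k : Int) 1).foldl (fun new_report i =>
        let p := PySem.List.pyGetD prev_st i 0
        let c := PySem.List.pyGetD curr_st i 0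
        let dt := PySem.List.pyGetD curr_st 0 0
        if ¬ (p = 0 ∧ c = 0) then
          if p = 0 ∧ c = 1 then new_report ++ [[i, dt, dt, 1]]
          else if p = 1 ∧ c = 1 then new_report ++ [[i, dt, dt, 2]]
          else if p = 1 ∧ c = 0 then new_report ++ [[i, dt, dt, 3]]
          else new_report
        else new_report) [] =
      (PySem.List.pyRange 0 (k : Int) 1).filterMap
        (fun j => (pvEvAt prev_st curr_st j).map
          (fun e => [j, PySem.List.pyGetD curr_st 0 0, PySem.List.pyGetD curr_st 0 0, e])) := by
  induction k with
  | zero => rw [PySem.List.pyRange_one_eq_nil (by norm_num)]; rfl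
  | succ k ih =>
    rw [pvRange_succ, List.foldl_append, List.filterMap_append, ih, List.foldl_cons,
      List.foldl_nil, pvStepNone_char]
    cases he : pvEvAt prev_st curr_st (k : Int) <;> simp [he, List.filterMap_cons]

lemma pvEvents_eq (prev_st curr_st : List Int) (h : prev_st.length = curr_st.length) :
    pvEvents prev_st curr_st =
      (PySem.List.pyRange 0 (curr_st.length : Int) 1).filterMap
        (fun j => (pvEvAt prev_st curr_st j).map (fun e => (j, e))) := by
  unfold pvEvents
  rw [PySem.List.enumerate_eq_map_pyRange _ ((0 : Int), (0 : Int)), List.filterMap_map]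
  have hzlen : PySem.List.len (prev_st.zip curr_st) = (curr_st.length : Int) := by
    simp [PySem.List.len_eq, h]
  rw [hzlen]
  apply List.filterMap_congr
  intro j hj
  obtain ⟨hj0, hjn⟩ := PySem.List.mem_pyRange_one.1 hj
  have hjc : j.toNat < curr_st.length := by omega
  have hjp : j.toNat < prev_st.length := by omega
  have hjz : j.toNat < (prev_st.zip curr_st).length := by simp [List.length_zip]; omega
  have hzip : PySem.List.pyGetD (prev_st.zip curr_st) j ((0 : Int), (0 : Int)) =
      (PySem.List.pyGetD prev_st j 0, PySem.List.pyGetD curr_st j 0) := by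
    rw [PySem.List.pyGetD_eq_getElem _ _ hj0 (by simpa [List.length_zip, h] using hjn),
      PySem.List.pyGetD_eq_getElem _ _ hj0 (by omega : j < (prev_st.length : Int)),
      PySem.List.pyGetD_eq_getElem _ _ hj0 (by omega : j < (curr_st.length : Int))]
    exact List.getElem_zip
  simp only [Function.comp_apply, hzip, pvEV_get]
  rfl

lemma pvUpdates_eq (prev_st curr_st : List Int) (h : prev_st.length = curr_st.length) :
    (pvEvents prev_st curr_st).filter (fun q => decide (q.2 ≠ 1)) =
      pvUpdsTo prev_st curr_st curr_st.length := by
  rw [pvEvents_eq _ _ h, List.filter_filterMap]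
  unfold pvUpdsTo
  apply List.filterMap_congr
  intro j _
  cases he : pvEvAt prev_st curr_st j with
  | none => simp [he]
  | some e => by_cases h1 : e = 1 <;> simp [he, h1, Option.filter]

lemma pvApps_eq (prev_st curr_st : List Int) (dt : Int) (h : prev_st.length = curr_st.length) :
    ((pvEvents prev_st curr_st).filter (fun q => decide (q.2 = 1))).map
        (fun q => [q.1, dt, dt, 1]) =
      pvAppsTo prev_st curr_st dt curr_st.length := by
  rw [pvEvents_eq _ _ h, List.filter_filterMap, List.map_filterMap]
  unfold pvAppsTo
  apply List.filterMap_congr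
  intro j _
  cases he : pvEvAt prev_st curr_st j with
  | none => simp [he]
  | some e => by_cases h1 : e = 1 <;> simp [he, h1, Option.filter]

lemma pvRows_eq (prev_st curr_st : List Int) (dt : Int) (h : prev_st.length = curr_st.length) :
    (pvEvents prev_st curr_st).map (fun q => [q.1, dt, dt, q.2]) =
      (PySem.List.pyRange 0 (curr_st.length : Int) 1).filterMap
        (fun j => (pvEvAt prev_st curr_st j).map (fun e => [j, dt, dt, e])) := by
  rw [pvEvents_eq _ _ h, List.map_filterMap]
  apply List.filterMap_congr
  intro j _
  cases he : pvEvAt prev_st curr_st j <;> simp [he]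

theorem final : ∀ (prev_st : List Int) (curr_st : List Int) (lastReport : Option (List (List Int))),
    Pre_getReportList prev_st curr_st lastReport →
    getReportList prev_st curr_st lastReport = getReportList_alt prev_st curr_st lastReport := by
  intro prev_st curr_st lastReport hPre
  obtain ⟨hlen, -⟩ := hPre
  unfold getReportList getReportList_alt
  rw [if_neg (fun hne => hne hlen), if_neg (fun hne => hne hlen)]
  cases lastReport with
  | none =>
    simp only []
    rw [foldNone, pvRows_eq _ _ _ hlen]
  | some rep =>
    simp only []
    rw [foldSome]
    have hrep' : (if (pvEvents prev_st curr_st).filter (fun q => decide (q.2 ≠ 1)) ≠ [] then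
          pvApplyUpds (pvOpenIdx rep) (PySem.List.pyGetD curr_st 0 0) rep
            ((pvEvents prev_st curr_st).filter (fun q => decide (q.2 ≠ 1)))
        else rep) =
        pvApplyUpds (pvOpenIdx rep) (PySem.List.pyGetD curr_st 0 0) rep
          ((pvEvents prev_st curr_st).filter (fun q => decide (q.2 ≠ 1))) := by
      by_cases hup : (pvEvents prev_st curr_st).filter (fun q => decide (q.2 ≠ 1)) = []
      · rw [if_neg (fun hne => hne hup), hup]
        rfl
      · rw [if_pos hup]
    rw [hrep', pvUpdates_eq _ _ hlen, pvApps_eq _ _ _ hlen]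

-- ===== VERDICT (by name: the statement is the Claim_ definition above) =====
theorem getReportList_spec : Claim_equal_getReportList := by
  intro prev_st curr_st lastReport _hDom hPre
  unfold Spec_getReportList
  exact final prev_st curr_st lastReport hPre
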